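-- pv_equiv track=rewrite | github.com/wayne8902/EDC_System | permission_sys/utils.py | check_permission_hierarchy
-- ===== SOURCE A (Python) =====
-- from typing import Dict, Any, Optional, List, Union
--
-- def check_permission_hierarchy(required_permission: str,
--                              user_permissions: List[str]) -> bool:
--     """
--     檢查權限階層（支援萬用字元和階層權限）
--
--     Args:
--         required_permission: 需要的權限
--         user_permissions: 用戶擁有的權限
--
--     Returns:
--         是否擁有權限
--     """
--     # 直接匹配
--     if required_permission in user_permissions:
--         return True
--
--     # 檢查萬用字元權限（例如：users.* 包含 users.create）
--     required_parts = required_permission.split('.')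
--     for permission in user_permissions:
--         if permission.endswith('.*'):
--             permission_prefix = permission[:-2]  # 移除 .*
--             if required_permission.startswith(permission_prefix + '.'):
--                 return True
--
--     # 檢查超級管理員權限
--     if 'system.admin' in user_permissions or '*' in user_permissions:
--         return True
--
--     return False
-- ===== SOURCE B (Python) =====
-- def check_permission_hierarchy(required_permission, user_permissions):
--     """Set-based lookup: instead of scanning user_permissions for '.*' entries,
--     build a set once and probe it with wildcard keys generated from the
--     required permission's dot positions."""
--     perm_set = set(user_permissions)
--     if required_permission in perm_set:
--         return True
--     for i, ch in enumerate(required_permission):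
--         if ch == '.' and required_permission[:i] + '.*' in perm_set:
--             return True
--     return 'system.admin' in perm_set or '*' in perm_set
-- ===== Notes on version B (the rewrite author's own statement) =====
-- stated objective: alternative
-- what changed: Instead of scanning user_permissions for entries ending in '.*' and testing each prefix against the required permission, B builds a set from user_permissions once and probes it with the candidate wildcard keys generated at each dot position of the required permission (reversed traversal: loop over the required permission, not over the permission list).
import Mathlib
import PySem

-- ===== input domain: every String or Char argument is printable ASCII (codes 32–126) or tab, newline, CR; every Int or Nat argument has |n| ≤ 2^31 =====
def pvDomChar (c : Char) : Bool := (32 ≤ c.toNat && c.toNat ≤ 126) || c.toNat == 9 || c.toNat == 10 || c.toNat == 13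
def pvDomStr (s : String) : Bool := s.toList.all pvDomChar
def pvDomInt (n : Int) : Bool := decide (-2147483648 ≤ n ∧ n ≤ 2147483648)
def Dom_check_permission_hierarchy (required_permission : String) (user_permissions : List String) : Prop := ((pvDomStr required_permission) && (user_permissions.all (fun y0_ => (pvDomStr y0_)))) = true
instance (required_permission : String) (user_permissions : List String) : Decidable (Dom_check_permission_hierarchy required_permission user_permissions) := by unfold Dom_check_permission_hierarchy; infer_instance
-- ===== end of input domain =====

-- B replaces A's scan of user_permissions for '.*' entries by one set built from
-- user_permissions probed with wildcard keys generated at the required permission's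
-- dot positions (objective: alternative/idiomatic; same task, reversed traversal).

-- ===== PORT A =====
-- string ops are ported on List Char via PySem.Chars/PySem.List (exact)
def check_permission_hierarchy (required_permission : String) (user_permissions : List String) : Bool :=
  if user_permissions.contains required_permission then true
  else
    -- A computes required_parts but never uses it
    let _required_parts := PySem.Str.split? required_permission "."
    if user_permissions.any (fun permission =>
        PySem.Chars.endswith permission.toList ['.', '*'] &&
        PySem.Chars.startswith required_permission.toList
          (PySem.List.slice permission.toList none (some (-2)) ++ ['.']))
    then true
    else if user_permissions.contains "system.admin" || user_permissions.contains "*" then true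
    else false

-- ===== PORT B =====
def check_permission_hierarchy_alt (required_permission : String) (user_permissions : List String) : Bool :=
  let perm_set : PySem.Set String := PySem.Set.ofList user_permissions
  if PySem.Set.contains perm_set required_permission then true
  else
    let cs := required_permission.toList
    if (PySem.List.enumerate cs).any (fun p =>
        p.2 == '.' &&
        PySem.Set.contains perm_set
          (String.ofList (PySem.List.slice cs none (some p.1) ++ ['.', '*'])))
    then true
    else PySem.Set.contains perm_set "system.admin" || PySem.Set.contains perm_set "*"

-- ===== PRECONDITION & SPEC =====
def Spec_check_permission_hierarchy (required_permission : String) (user_permissions : List String) (out : Bool) : Prop := out = check_permission_hierarchy_alt required_permission user_permissions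
instance (required_permission : String) (user_permissions : List String) (out : Bool) : Decidable (Spec_check_permission_hierarchy required_permission user_permissions out) := by unfold Spec_check_permission_hierarchy; infer_instance

-- ===== CLAIM (what is proved, stated in full; the proofs are below) =====
def Claim_equal_check_permission_hierarchy : Prop := ∀ (required_permission : String) (user_permissions : List String), Dom_check_permission_hierarchy required_permission user_permissions → Spec_check_permission_hierarchy required_permission user_permissions (check_permission_hierarchy required_permission user_permissions)

-- ===== LEMMAS AND PROOFS =====

-- xs[:-2] on a list ending in two extra elements drops exactly those two
lemma pv_slice_neg_two {α : Type} (pre : List α) (a b : α) :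
    PySem.List.slice (pre ++ [a, b]) none (some (-2)) = pre := by
  simp [PySem.List.slice, PySem.List.clampIdx]

-- xs[:k] for 0 ≤ k is take
lemma pv_slice_natCast {α : Type} (xs : List α) (k : Nat) :
    PySem.List.slice xs none (some (k : Int)) = xs.take k := by
  have h : ¬((k : Int) < 0) := by omega
  simp [PySem.List.slice, PySem.List.clampIdx, h]

-- the heart: A's per-permission wildcard test fires exactly when the permission is
-- one of B's generated candidate keys (a proper dot-prefix of required + ".*")
lemma pv_wildcard_iff (cs : List Char) (p : String) :
    (PySem.Chars.endswith p.toList ['.', '*'] &&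
      PySem.Chars.startswith cs (PySem.List.slice p.toList none (some (-2)) ++ ['.'])) = true
    ↔ ∃ k : Nat, ∃ h : k < cs.length, cs[k] = '.' ∧ p.toList = cs.take k ++ ['.', '*'] := by
  constructor
  · rintro h
    rw [Bool.and_eq_true] at h
    obtain ⟨he, hs⟩ := h
    rw [PySem.Chars.endswith_iff] at he
    obtain ⟨pre, hpre⟩ := he
    rw [← hpre, pv_slice_neg_two] at hs
    rw [PySem.Chars.startswith_iff] at hs
    obtain ⟨rest, hrest⟩ := hs
    subst hrest
    refine ⟨pre.length, ?_, ?_, ?_⟩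
    · simp
    · simp
    · rw [← hpre, List.append_assoc, List.take_left]
  · rintro ⟨k, hk, hdot, hp⟩
    rw [Bool.and_eq_true, PySem.Chars.endswith_iff, hp, pv_slice_neg_two,
      PySem.Chars.startswith_iff]
    refine ⟨⟨cs.take k, rfl⟩, ?_⟩
    refine ⟨cs.drop (k + 1), ?_⟩
    rw [List.append_assoc, List.singleton_append, ← hdot, List.getElem_cons_drop,
      List.take_append_drop]

-- Set.contains (ofList l) is plain list membership
lemma pv_set_contains (l : List String) (x : String) :
    PySem.Set.contains (PySem.Set.ofList l) x = l.contains x := by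
  simp [PySem.Set.contains, PySem.Set.mem_ofList]

-- A's permission scan equals B's candidate-key scan
lemma pv_any_eq (req : String) (perms : List String) :
    perms.any (fun permission =>
        PySem.Chars.endswith permission.toList ['.', '*'] &&
        PySem.Chars.startswith req.toList
          (PySem.List.slice permission.toList none (some (-2)) ++ ['.']))
    = (PySem.List.enumerate req.toList).any (fun p =>
        p.2 == '.' &&
        PySem.Set.contains (PySem.Set.ofList perms)
          (String.ofList (PySem.List.slice req.toList none (some p.1) ++ ['.', '*']))) := by
  rcases h : (PySem.List.enumerate req.toList).any (fun p =>
      p.2 == '.' && PySem.Set.contains (PySem.Set.ofList perms)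
        (String.ofList (PySem.List.slice req.toList none (some p.1) ++ ['.', '*']))) with _ | _
  · rw [List.any_eq_false] at h ⊢
    intro perm hperm hA
    rw [pv_wildcard_iff] at hA
    obtain ⟨k, hk, hdot, hp⟩ := hA
    refine h ((k : Int), req.toList[k]) ?_ ?_
    · rw [PySem.List.mem_enumerate_iff]
      exact ⟨k, hk, by simp⟩
    · simp only [hdot, pv_slice_natCast, pv_set_contains, beq_self_eq_true, Bool.true_and]
      rw [List.contains_iff_mem]
      have : String.ofList (req.toList.take k ++ ['.', '*']) = perm := by
        apply String.toList_inj.mp; rw [hp, String.toList_ofList]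
      rwa [this]
  · rw [List.any_eq_true] at h ⊢
    obtain ⟨⟨i, c⟩, hmem, hc⟩ := h
    rw [PySem.List.mem_enumerate_iff] at hmem
    obtain ⟨k, hk, hik⟩ := hmem
    simp only [Prod.mk.injEq] at hik
    obtain ⟨hi, hcc⟩ := hik
    simp only [hi, hcc, zero_add, pv_slice_natCast, pv_set_contains, Bool.and_eq_true, beq_iff_eq] at hc
    obtain ⟨hdot, hcont⟩ := hc
    refine ⟨String.ofList (req.toList.take k ++ ['.', '*']), ?_, ?_⟩
    · rw [← List.contains_iff_mem]; exact hcont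
    · rw [pv_wildcard_iff]
      exact ⟨k, hk, hdot, String.toList_ofList⟩

-- ===== VERDICT (by name: the statement is the Claim_ definition above) =====
theorem check_permission_hierarchy_spec : Claim_equal_check_permission_hierarchy := by
  intro req perms _
  unfold Spec_check_permission_hierarchy check_permission_hierarchy check_permission_hierarchy_alt
  simp only [pv_set_contains, pv_any_eq req perms]
  split_ifs <;> simp_all
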